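-- pv_equiv track=rewrite | github.com/adfou/cell-scrape | Filter/scrap/filter.py | func_get_by_phrase
-- ===== SOURCE A (Python) =====
-- def func_get_by_phrase(parag):
--     full_f = []
--     i = 0
--     while i < len(parag):
--
--       if parag[i][0] == "q":
--         full_f.append(parag[i] )
--       if parag[i] != "*" and parag[i][0] != "q" :
--         phrase = True
--         add = False
--         ph = parag[i]
--         if i+1 < len(parag) :
--           while (phrase == True and i+1 < len(parag)):
--             if parag[i+1] != "*" and parag[i+1][0] != "q":
--               ph = ph + ' '+ parag[i+1]
--               i = i + 1
--               add = True
--             else :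
--               phrase = False
--
--         full_f.append(ph)
--       i = i+1
--     return full_f
-- ===== SOURCE B (Python) =====
-- def func_get_by_phrase(parag):
--     full_f = []
--     buf = []
--     for tok in parag:
--         if tok.startswith("q"):
--             if buf:
--                 full_f.append(" ".join(buf))
--                 buf = []
--             full_f.append(tok)
--         elif tok == "*":
--             if buf:
--                 full_f.append(" ".join(buf))
--                 buf = []
--         else:
--             buf.append(tok)
--     if buf:
--         full_f.append(" ".join(buf))
--     return full_f
-- ===== Notes on version B (the rewrite author's own statement) =====
-- stated objective: simpler
-- what changed: Replaced A's shared-index outer loop with lookahead inner while-loop (which grows each phrase by repeated string concatenation) by a single flat pass keeping a buffer of pending ordinary tokens, flushed with ' '.join at each marker or q-token and once at the end.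
import Mathlib
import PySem

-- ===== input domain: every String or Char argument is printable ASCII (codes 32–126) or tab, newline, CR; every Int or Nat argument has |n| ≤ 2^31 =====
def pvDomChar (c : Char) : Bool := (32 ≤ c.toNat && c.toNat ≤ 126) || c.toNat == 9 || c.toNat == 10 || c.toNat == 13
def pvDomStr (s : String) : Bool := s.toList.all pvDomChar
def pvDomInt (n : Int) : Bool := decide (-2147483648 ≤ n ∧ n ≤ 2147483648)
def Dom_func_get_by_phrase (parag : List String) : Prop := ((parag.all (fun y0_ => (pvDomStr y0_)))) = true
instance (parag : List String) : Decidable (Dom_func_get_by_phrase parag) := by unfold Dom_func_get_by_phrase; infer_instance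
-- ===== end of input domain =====

-- ===== PORT A =====
-- B groups consecutive ordinary tokens with an explicit pending buffer instead of A's shared-index lookahead inner loop; return values proved equal (objective: simpler).

-- first character of s equals 'q' (A's parag[i][0] == "q"; empty strings raise in Python and are excluded by Pre_)
def pvFirstQ (s : String) : Bool := s.toList.head? == some 'q'

-- A's inner while loop: extend ph with following ordinary tokens, returning (ph, final i)
def pvInnerA (parag : List String) (i : Nat) (ph : String) : String × Nat :=
  if i + 1 < parag.length ∧ (parag.getD (i+1) "" ≠ "*" ∧ pvFirstQ (parag.getD (i+1) "") = false) then
    pvInnerA parag (i+1) (ph ++ " " ++ parag.getD (i+1) "")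
  else (ph, i)
termination_by parag.length - i

theorem pvInnerA_ge (parag : List String) (i : Nat) (ph : String) :
    i ≤ (pvInnerA parag i ph).2 := by
  fun_induction pvInnerA with
  | case1 i ph h ih => omega
  | case2 i ph h => simp

-- A's outer while loop
def pvGoA (parag : List String) (i : Nat) (acc : List String) : List String :=
  if h : i < parag.length then
    let t := parag.getD i ""
    let acc1 := if pvFirstQ t then acc ++ [t] else acc
    if t ≠ "*" ∧ pvFirstQ t = false then
      let r := pvInnerA parag i t
      pvGoA parag (r.2 + 1) (acc1 ++ [r.1])
    else
      pvGoA parag (i+1) acc1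
  else acc
termination_by parag.length - i
decreasing_by
  · have := pvInnerA_ge parag i (parag.getD i "")
    omega
  · omega

def func_get_by_phrase (parag : List String) : List String := pvGoA parag 0 []

-- ===== PORT B =====
-- flush the pending buffer (if non-empty, append " ".join(buf))
def pvFlush (acc buf : List String) : List String :=
  if buf.isEmpty then acc else acc ++ [PySem.Str.join " " buf]

-- B's single pass with a pending-buffer accumulator
def pvGoB (l : List String) (buf acc : List String) : List String :=
  match l with
  | [] => pvFlush acc buf
  | t :: rest =>
    if PySem.Str.startswith t "q" then pvGoB rest [] (pvFlush acc buf ++ [t])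
    else if t = "*" then pvGoB rest [] (pvFlush acc buf)
    else pvGoB rest (buf ++ [t]) acc

def func_get_by_phrase_alt (parag : List String) : List String := pvGoB parag [] []

-- ===== PRECONDITION & SPEC =====
-- Pre_ excludes lists containing the empty string "", on which A raises IndexError at parag[i][0].
def Pre_func_get_by_phrase (parag : List String) : Prop := ∀ s ∈ parag, s ≠ ""
instance (parag : List String) : Decidable (Pre_func_get_by_phrase parag) := by unfold Pre_func_get_by_phrase; infer_instance
def pvWitness_func_get_by_phrase : List String := ["hello", "there", "*", "q33", "x"]

def Spec_func_get_by_phrase (parag : List String) (out : List String) : Prop := out = func_get_by_phrase_alt parag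
instance (parag : List String) (out : List String) : Decidable (Spec_func_get_by_phrase parag out) := by unfold Spec_func_get_by_phrase; infer_instance

-- ===== CLAIM (what is proved, stated in full; the proofs are below) =====
def Claim_equal_func_get_by_phrase : Prop := ∀ (parag : List String), Dom_func_get_by_phrase parag → Pre_func_get_by_phrase parag → Spec_func_get_by_phrase parag (func_get_by_phrase parag)

-- ===== LEMMAS AND PROOFS =====

-- B's "ordinary token" test (neither a q-token nor the marker)
def pvOrdB (s : String) : Bool := !(PySem.Str.startswith s "q") && s ≠ "*"

-- reference grouping function both loops are reduced to
def pvR : List String → List String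
  | [] => []
  | t :: rest =>
    if PySem.Str.startswith t "q" then t :: pvR rest
    else if t = "*" then pvR rest
    else PySem.Str.join " " (t :: rest.takeWhile pvOrdB) :: pvR (rest.dropWhile pvOrdB)
termination_by l => l.length
decreasing_by
  · simp
  · simp
  · have := List.length_dropWhile_le pvOrdB rest
    simp; omega

theorem chJoinFlat (run : List (List Char)) (t : List Char) :
    PySem.Chars.join [' '] (t :: run) = t ++ run.flatMap (fun s => ' ' :: s) := by
  induction run generalizing t with
  | nil => simp [PySem.Chars.join_singleton]
  | cons u run ih => rw [PySem.Chars.join_cons_cons, ih]; simp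

theorem strFoldlFlat (run : List String) (t : String) :
    (run.foldl (fun a s => a ++ " " ++ s) t).toList
      = t.toList ++ (run.map String.toList).flatMap (fun s => ' ' :: s) := by
  induction run generalizing t with
  | nil => simp
  | cons u run ih => rw [List.foldl_cons, ih]; simp

theorem pvJoin_foldl (run : List String) (t : String) :
    PySem.Str.join " " (t :: run) = run.foldl (fun a s => a ++ " " ++ s) t := by
  apply String.ext_iff.mpr
  rw [PySem.Str.toList_join, strFoldlFlat, List.map_cons]
  have h : " ".toList = [' '] := rfl
  rw [h, chJoinFlat]

theorem pvGoB_eq (l : List String) (buf acc : List String) :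
    pvGoB l buf acc =
      if buf.isEmpty then acc ++ pvR l
      else (acc ++ [PySem.Str.join " " (buf ++ l.takeWhile pvOrdB)]) ++ pvR (l.dropWhile pvOrdB) := by
  induction l generalizing buf acc with
  | nil =>
    by_cases hb : buf.isEmpty <;> simp [pvGoB, pvFlush, pvR, hb]
  | cons t rest ih =>
    by_cases hq : PySem.Str.startswith t "q" = true
    all_goals simp only [PySem.Str.startswith_eq, show ("q" : String).toList = ['q'] from rfl] at hq
    · have ht : pvOrdB t = false := by simp [pvOrdB, hq]
      rw [show pvGoB (t :: rest) buf acc = pvGoB rest [] (pvFlush acc buf ++ [t]) by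
            simp [pvGoB, hq], ih]
      by_cases hb : buf.isEmpty <;>
        simp [pvFlush, pvR, hq, ht, hb, List.takeWhile_cons, List.dropWhile_cons]
    · by_cases hstar : t = "*"
      · subst hstar
        have ht : pvOrdB "*" = false := by simp [pvOrdB]
        rw [show pvGoB ("*" :: rest) buf acc = pvGoB rest [] (pvFlush acc buf) by
              simp [pvGoB, (by decide : PySem.Chars.startswith ['*'] ['q'] = false)], ih]
        by_cases hb : buf.isEmpty <;>
          simp [pvFlush, pvR, (by decide : PySem.Chars.startswith ['*'] ['q'] = false), ht, hb,
            List.takeWhile_cons, List.dropWhile_cons]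
      · have ht : pvOrdB t = true := by simp [pvOrdB, hq, hstar]
        rw [show pvGoB (t :: rest) buf acc = pvGoB rest (buf ++ [t]) acc by
              simp [pvGoB, hq, hstar], ih]
        by_cases hb : buf.isEmpty
        · have : buf = [] := by simpa [List.isEmpty_iff] using hb
          subst this
          simp [pvR, hq, hstar, ht, List.takeWhile_cons, List.dropWhile_cons]
        · simp [pvR, hq, hstar, ht, hb, List.takeWhile_cons, List.dropWhile_cons]

theorem pvStartsQ_eq (s : String) (hs : s ≠ "") :
    PySem.Str.startswith s "q" = pvFirstQ s := by
  have hl : s.toList ≠ [] := by simpa [String.toList_eq_nil_iff] using hs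
  obtain ⟨c, cs, hcs⟩ := List.exists_cons_of_ne_nil hl
  rw [PySem.Str.startswith_eq]
  unfold pvFirstQ
  rw [hcs]
  by_cases hc : c = 'q' <;> simp [PySem.Chars.startswith, hc, List.isPrefixOf, eq_comm]

theorem pvInnerA_eq (parag : List String) (i : Nat) (ph : String) (hpre : Pre_func_get_by_phrase parag) :
    pvInnerA parag i ph =
      (((parag.drop (i+1)).takeWhile pvOrdB).foldl (fun a s => a ++ " " ++ s) ph,
       i + ((parag.drop (i+1)).takeWhile pvOrdB).length) := by
  fun_induction pvInnerA parag i ph with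
  | case1 i ph h ih =>
    obtain ⟨hlt, hdiff, hqf⟩ := h
    have hget : parag.getD (i+1) "" = parag[i+1] := List.getD_eq_getElem _ _ hlt
    have hne : parag[i+1] ≠ "" := hpre _ (List.getElem_mem hlt)
    rw [hget] at hdiff hqf
    have hord : pvOrdB (parag[i+1]) = true := by
      unfold pvOrdB; rw [pvStartsQ_eq _ hne]; simp [hqf, hdiff]
    rw [ih, hget, List.drop_eq_getElem_cons hlt, List.takeWhile_cons, hord]
    refine Prod.ext ?_ ?_ <;> simp <;> omega
  | case2 i ph h =>
    by_cases hlt : i + 1 < parag.length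
    · have hget : parag.getD (i+1) "" = parag[i+1] := List.getD_eq_getElem _ _ hlt
      have hne : parag[i+1] ≠ "" := hpre _ (List.getElem_mem hlt)
      rw [hget] at h
      have hord : pvOrdB (parag[i+1]) = false := by
        unfold pvOrdB; rw [pvStartsQ_eq _ hne]
        by_cases hq : pvFirstQ parag[i+1] = true
        · simp [hq]
        · have hd : parag[i+1] = "*" := by
            by_contra hd; exact h ⟨hlt, hd, by simpa using hq⟩
          simp [hd]
      rw [List.drop_eq_getElem_cons hlt, List.takeWhile_cons, hord]
      simp
    · rw [List.drop_eq_nil_iff.mpr (by omega)]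
      simp

theorem pvDropWhile_drop {α : Type} (p : α → Bool) (l : List α) :
    l.dropWhile p = l.drop (l.takeWhile p).length := by
  have h := List.drop_left (l₁ := l.takeWhile p) (l₂ := l.dropWhile p)
  rw [List.takeWhile_append_dropWhile] at h
  exact h.symm

theorem pvGoA_eq (parag : List String) (i : Nat) (acc : List String) (hpre : Pre_func_get_by_phrase parag) :
    pvGoA parag i acc = acc ++ pvR (parag.drop i) := by
  fun_induction pvGoA parag i acc with
  | case1 i acc h t acc1 cond r ih =>
    obtain ⟨hdiff, hqf⟩ := cond
    have hget : parag.getD i "" = parag[i] := List.getD_eq_getElem _ _ h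
    have hne : parag[i] ≠ "" := hpre _ (List.getElem_mem h)
    simp only [t] at hdiff hqf
    rw [hget] at hdiff hqf
    have hord : pvOrdB (parag[i]) = true := by
      unfold pvOrdB; rw [pvStartsQ_eq _ hne]; simp [hqf, hdiff]
    simp only [t, acc1, r, hget, hqf, Bool.false_eq_true, reduceDIte,
      pvInnerA_eq parag i _ hpre] at ih ⊢
    rw [ih, List.drop_eq_getElem_cons h,
        show pvR (parag[i] :: List.drop (i+1) parag)
          = PySem.Str.join " " (parag[i] :: (List.drop (i+1) parag).takeWhile pvOrdB)
              :: pvR ((List.drop (i+1) parag).dropWhile pvOrdB) from by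
          rw [pvR, pvStartsQ_eq _ hne]
          simp [hqf, hdiff],
        pvJoin_foldl, pvDropWhile_drop, List.drop_drop]
    simp [Nat.add_comm, Nat.add_assoc, Nat.add_left_comm]
  | case2 i acc h t acc1 cond ih =>
    have hget : parag.getD i "" = parag[i] := List.getD_eq_getElem _ _ h
    have hne : parag[i] ≠ "" := hpre _ (List.getElem_mem h)
    simp only [t] at cond
    rw [hget] at cond
    by_cases hq : pvFirstQ parag[i] = true
    · simp only [t, acc1, hget, hq, reduceDIte] at ih ⊢
      rw [ih, List.drop_eq_getElem_cons h,
          show pvR (parag[i] :: List.drop (i+1) parag) = parag[i] :: pvR (List.drop (i+1) parag) from by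
            rw [pvR, pvStartsQ_eq _ hne]; simp [hq]]
      simp
    · have hd : parag[i] = "*" := by
        by_contra hd; exact cond ⟨hd, by simpa using hq⟩
      simp only [t, acc1, hget, hq, Bool.false_eq_true, reduceDIte] at ih ⊢
      rw [ih, List.drop_eq_getElem_cons h,
          show pvR (parag[i] :: List.drop (i+1) parag) = pvR (List.drop (i+1) parag) from by
            rw [pvR, pvStartsQ_eq _ hne]; simp [hd, (by decide : pvFirstQ "*" = false)]]
  | case3 i acc h =>
    rw [List.drop_eq_nil_iff.mpr (by omega)]
    simp [pvR]

-- ===== VERDICT (by name: the statement is the Claim_ definition above) =====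
theorem func_get_by_phrase_spec : Claim_equal_func_get_by_phrase := by
  intro parag _ hpre
  unfold Spec_func_get_by_phrase func_get_by_phrase func_get_by_phrase_alt
  rw [pvGoA_eq parag 0 [] hpre, pvGoB_eq]
  simp
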